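-- pv_equiv track=rewrite | github.com/jungt72/sealAI | backend/app/agent/runtime/gate.py | _metric_reason_category
-- ===== SOURCE A (Python) =====
-- def _metric_reason_category(reason: str) -> str:
--     text = str(reason or "").strip()
--     if not text:
--         return "unknown"
--     for prefix in (
--         "hard_override",
--         "json_parse_fallback",
--         "low_confidence_fallback",
--         "timeout_with_deterministic_signal",
--         "timeout_fallback_to_governed",
--         "sticky_governed_session",
--         "governed_light_override",
--         "governed_instant_override",
--         "deterministic_instant",
--         "deterministic_light",
--         "llm_frontdoor_classification",
--     ):
--         if text == prefix or text.startswith(f"{prefix}:"):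
--             return prefix
--     return "other"
-- ===== SOURCE B (Python) =====
-- _PREFIXES = (
--     "hard_override",
--     "json_parse_fallback",
--     "low_confidence_fallback",
--     "timeout_with_deterministic_signal",
--     "timeout_fallback_to_governed",
--     "sticky_governed_session",
--     "governed_light_override",
--     "governed_instant_override",
--     "deterministic_instant",
--     "deterministic_light",
--     "llm_frontdoor_classification",
-- )
--
-- # Character trie over the known prefixes; the "" key of a node marks an
-- # accepting state and stores the category name.
-- _TRIE = {}
-- for _w in _PREFIXES:
--     _node = _TRIE
--     for _c in _w:
--         _node = _node.setdefault(_c, {})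
--     _node[""] = _w
--
--
-- def _metric_reason_category(reason: str) -> str:
--     text = str(reason or "").strip()
--     if not text:
--         return "unknown"
--     node = _TRIE
--     for ch in text:
--         if ch == ":":
--             break
--         nxt = node.get(ch)
--         if nxt is None:
--             return "other"
--         node = nxt
--     return node.get("", "other")
-- ===== Notes on version B (the rewrite author's own statement) =====
-- stated objective: alternative
-- what changed: Replaces A's linear scan of eleven equality/startswith prefix tests by a character trie built once from the prefixes: the input is walked one character at a time through the trie (stopping at ':' or end) and the category is read off the accepting node, with no per-prefix comparison or membership lookup at all.
import Mathlib
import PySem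

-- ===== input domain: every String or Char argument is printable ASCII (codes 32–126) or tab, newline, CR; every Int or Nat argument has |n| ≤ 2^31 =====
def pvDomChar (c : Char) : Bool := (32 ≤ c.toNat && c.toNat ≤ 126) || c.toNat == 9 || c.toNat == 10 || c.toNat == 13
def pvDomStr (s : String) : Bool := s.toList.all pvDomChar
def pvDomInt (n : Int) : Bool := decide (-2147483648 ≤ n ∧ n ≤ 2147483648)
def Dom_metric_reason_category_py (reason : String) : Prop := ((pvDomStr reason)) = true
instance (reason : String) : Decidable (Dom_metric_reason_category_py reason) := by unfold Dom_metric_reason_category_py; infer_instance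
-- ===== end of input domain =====

-- B replaces A's linear scan of eleven equality/startswith prefix tests by a character
-- trie built once from the prefixes and walked one input character at a time (objective: alternative).


-- ===== PORT A =====
-- the tuple of prefixes A iterates over, as lists of characters
def pvPrefixesA : List (List Char) :=
  ["hard_override".toList,
   "json_parse_fallback".toList,
   "low_confidence_fallback".toList,
   "timeout_with_deterministic_signal".toList,
   "timeout_fallback_to_governed".toList,
   "sticky_governed_session".toList,
   "governed_light_override".toList,
   "governed_instant_override".toList,
   "deterministic_instant".toList,
   "deterministic_light".toList,
   "llm_frontdoor_classification".toList]

-- A's for-loop: first prefix with text == prefix or text.startswith(prefix + ":") wins, else "other"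
def pvLoopA (t : List Char) : List (List Char) → String
  | [] => "other"
  | p :: rest =>
      if t == p || PySem.Chars.startswith t (p ++ [':']) then String.ofList p else pvLoopA t rest

def metric_reason_category_py (reason : String) : String :=
  -- str(reason or "") is the identity on a str argument (falsy str = ""), so text = reason.strip()
  let text := PySem.Str.strip reason
  if text == "" then "unknown"
  else pvLoopA text.toList pvPrefixesA

-- ===== PORT B =====
-- B's trie: a Python dict-of-dicts node becomes a node carrying the optional terminal value
-- (Python's "" key) and an association list of char children (dict insertion order, overwrite in place)
mutual
inductive PvTrie where
  | node : Option String → PvKids → PvTrie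
inductive PvKids where
  | nil : PvKids
  | cons : Char → PvTrie → PvKids → PvKids
end

-- node.get(ch) on the children dict
def pvKidsGet : PvKids → Char → Option PvTrie
  | .nil, _ => none
  | .cons c t rest, d => if d = c then some t else pvKidsGet rest d

-- overwrite-in-place / append semantics of a dict store
def pvKidsSet : PvKids → Char → PvTrie → PvKids
  | .nil, c, t => .cons c t .nil
  | .cons c' t' rest, c, t =>
      if c = c' then .cons c' t rest else .cons c' t' (pvKidsSet rest c t)

-- the module-level inner loop: _node.setdefault(_c, {}) down the word, then _node[""] = _w
def pvInsert : PvTrie → List Char → String → PvTrie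
  | .node _ kids, [], v => .node (some v) kids
  | .node term kids, c :: cs, v =>
      .node term (pvKidsSet kids c
        (pvInsert ((pvKidsGet kids c).getD (.node none .nil)) cs v))

-- the module-level outer loop over _PREFIXES
def pvTrie : PvTrie :=
  pvPrefixesA.foldl (fun tr w => pvInsert tr w (String.ofList w)) (.node none .nil)

-- B's for-loop over text: break on ':', return "other" on a missing child, else descend;
-- afterwards node.get("", "other")
def pvWalk : PvTrie → List Char → String
  | .node term _, [] => term.getD "other"
  | .node term kids, c :: cs =>
      if c = ':' then term.getD "other"
      else
        match pvKidsGet kids c with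
        | none => "other"
        | some t' => pvWalk t' cs

def metric_reason_category_py_alt (reason : String) : String :=
  let text := PySem.Str.strip reason
  if text == "" then "unknown"
  else pvWalk pvTrie text.toList

-- ===== PRECONDITION & SPEC =====
def Spec_metric_reason_category_py (reason : String) (out : String) : Prop := out = metric_reason_category_py_alt reason
instance (reason : String) (out : String) : Decidable (Spec_metric_reason_category_py reason out) := by unfold Spec_metric_reason_category_py; infer_instance

-- ===== CLAIM (what is proved, stated in full; the proofs are below) =====
def Claim_equal_metric_reason_category_py : Prop := ∀ (reason : String), Dom_metric_reason_category_py reason → Spec_metric_reason_category_py reason (metric_reason_category_py reason)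

-- ===== LEMMAS AND PROOFS =====

-- a colon-free prefix p matches (equality or "p:" prefix) iff p is exactly the leading token of t
lemma pv_match_iff (t p : List Char) (hp : ':' ∉ p) :
    (t == p || PySem.Chars.startswith t (p ++ [':'])) = true ↔
      t.takeWhile (fun c => c != ':') = p := by
  simp only [Bool.or_eq_true, beq_iff_eq, PySem.Chars.startswith_iff]
  induction p generalizing t with
  | nil =>
      cases t with
      | nil => simp
      | cons c t' =>
          simp only [List.takeWhile_cons]
          constructor
          · rintro (h | h)
            · exact absurd h (by simp)
            · obtain ⟨r, hr⟩ := h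
              simp at hr
              simp [← hr.1]
          · intro h
            split at h
            · simp at h
            · right
              refine ⟨t', ?_⟩
              rename_i hc
              simp at hc
              simp [hc]
  | cons a p' ih =>
      have ha : a ≠ ':' := fun h => hp (h ▸ List.mem_cons_self)
      have hp' : ':' ∉ p' := fun h => hp (List.mem_cons_of_mem _ h)
      cases t with
      | nil =>
          simp only [List.takeWhile_nil]
          constructor
          · rintro (h | ⟨r, hr⟩) <;> simp_all
          · intro h; simp at h
      | cons c t' =>
          simp only [List.takeWhile_cons, List.cons_append]
          constructor
          · rintro (h | ⟨r, hr⟩)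
            · obtain ⟨hc, ht⟩ := List.cons.inj h
              subst hc
              have : t'.takeWhile (fun c => c != ':') = p' := (ih t' hp').mp (Or.inl ht)
              simp [ha, this]
            · obtain ⟨hc, ht⟩ := List.cons.inj hr.symm
              subst hc
              have : t'.takeWhile (fun c => c != ':') = p' :=
                (ih t' hp').mp (Or.inr ⟨r, ht.symm⟩)
              simp [ha, this]
          · intro h
            by_cases hc : c = ':'
            · simp [hc] at h
            · have hcb : (c != ':') = true := by simp [hc]
              rw [hcb] at h
              simp only [if_true] at h
              obtain ⟨hca, ht⟩ := List.cons.inj h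
              subst hca
              rcases (ih t' hp').mpr ht with h1 | ⟨r, hr⟩
              · exact Or.inl (by rw [h1])
              · exact Or.inr ⟨r, by rw [← hr]; simp⟩

-- A's loop over a colon-free prefix list returns the leading token when it is listed, else "other"
lemma pv_loop_eq (t : List Char) (L : List (List Char)) (h : ∀ p ∈ L, ':' ∉ p) :
    pvLoopA t L =
      if t.takeWhile (fun c => c != ':') ∈ L
      then String.ofList (t.takeWhile (fun c => c != ':')) else "other" := by
  induction L with
  | nil => simp [pvLoopA]
  | cons p rest ih =>
      have hp : ':' ∉ p := h p List.mem_cons_self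
      have hrest : ∀ q ∈ rest, ':' ∉ q := fun q hq => h q (List.mem_cons_of_mem _ hq)
      rw [pvLoopA]
      by_cases hm : (t == p || PySem.Chars.startswith t (p ++ [':'])) = true
      · have hk := (pv_match_iff t p hp).mp hm
        rw [if_pos hm, hk]
        simp
      · have hk : t.takeWhile (fun c => c != ':') ≠ p :=
          fun he => hm ((pv_match_iff t p hp).mpr he)
        rw [if_neg hm, ih hrest]
        simp [List.mem_cons, hk]

-- no prefix in A's list contains a colon
lemma pv_prefixes_colon_free : ∀ p ∈ pvPrefixesA, ':' ∉ p := by decide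

-- exact path lookup in a trie (the walk is this lookup of the leading token)
def pvLookup : PvTrie → List Char → Option String
  | .node term _, [] => term
  | .node _ kids, c :: cs =>
      match pvKidsGet kids c with
      | none => none
      | some t' => pvLookup t' cs

lemma pv_lookup_empty (k : List Char) : pvLookup (.node none .nil) k = none := by
  cases k <;> simp [pvLookup, pvKidsGet]

lemma pv_walk_eq_lookup (t : List Char) (tr : PvTrie) :
    pvWalk tr t = (pvLookup tr (t.takeWhile (fun c => c != ':'))).getD "other" := by
  induction t generalizing tr with
  | nil => cases tr with | node term kids => simp [pvWalk, pvLookup]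
  | cons c cs ih =>
      cases tr with
      | node term kids =>
          by_cases hc : c = ':'
          · simp [pvWalk, hc, pvLookup]
          · have hcb : (c != ':') = true := by simp [hc]
            simp only [pvWalk, if_neg hc, List.takeWhile_cons, hcb, if_true, pvLookup]
            cases h : pvKidsGet kids c with
            | none => simp
            | some t' => simp [ih]

lemma pv_kidsGet_set (kids : PvKids) (c : Char) (t : PvTrie) (d : Char) :
    pvKidsGet (pvKidsSet kids c t) d = if d = c then some t else pvKidsGet kids d := by
  -- structural recursion on the children list (the `induction` tactic refuses mutual inductives)
  match kids with
  | .nil => by_cases h : d = c <;> simp [pvKidsSet, pvKidsGet, h]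
  | .cons c' t' rest =>
      by_cases h1 : c = c'
      · subst h1
        by_cases h2 : d = c <;> simp [pvKidsSet, pvKidsGet, h2]
      · by_cases h2 : d = c'
        · subst h2
          have : ¬ d = c := fun h => h1 h.symm
          simp [pvKidsSet, h1, pvKidsGet, this]
        · simp [pvKidsSet, h1, pvKidsGet, h2, pv_kidsGet_set rest c t d]

lemma pv_lookup_insert (w : List Char) (tr : PvTrie) (v : String) (k : List Char) :
    pvLookup (pvInsert tr w v) k = if k = w then some v else pvLookup tr k := by
  induction w generalizing tr k with
  | nil =>
      cases tr with
      | node term kids =>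
          cases k with
          | nil => simp [pvInsert, pvLookup]
          | cons d ks => simp [pvInsert, pvLookup]
  | cons c cs ih =>
      cases tr with
      | node term kids =>
          cases k with
          | nil => simp [pvInsert, pvLookup]
          | cons d ks =>
              simp only [pvInsert, pvLookup, pv_kidsGet_set]
              by_cases hd : d = c
              · subst hd
                by_cases hk : ks = cs
                · subst hk
                  simp [ih]
                · have : ¬ (d :: ks = d :: cs) := by simp [hk]
                  simp only [if_neg this]
                  cases h : pvKidsGet kids d with
                  | none => simp [ih, hk, pv_lookup_empty]
                  | some t' => simp [ih, hk]
              · have : ¬ (d :: ks = c :: cs) := by simp [hd]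
                simp [hd, this]

lemma pv_lookup_fold (ws : List (List Char)) (tr : PvTrie) (k : List Char) :
    pvLookup (ws.foldl (fun tr w => pvInsert tr w (String.ofList w)) tr) k =
      if k ∈ ws then some (String.ofList k) else pvLookup tr k := by
  induction ws generalizing tr with
  | nil => simp
  | cons w ws' ih =>
      simp only [List.foldl_cons, ih, pv_lookup_insert, List.mem_cons]
      by_cases h1 : k ∈ ws'
      · simp [h1]
      · by_cases h2 : k = w
        · subst h2; simp [h1]
        · simp [h1, h2]

-- B's walk of the built trie computes exactly A's loop result
lemma pv_walk_trie (t : List Char) :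
    pvWalk pvTrie t =
      if t.takeWhile (fun c => c != ':') ∈ pvPrefixesA
      then String.ofList (t.takeWhile (fun c => c != ':')) else "other" := by
  rw [pv_walk_eq_lookup, pvTrie, pv_lookup_fold]
  by_cases h : t.takeWhile (fun c => c != ':') ∈ pvPrefixesA
  · simp [h]
  · simp [h, pv_lookup_empty]

-- ===== VERDICT (by name: the statement is the Claim_ definition above) =====
theorem metric_reason_category_py_spec : Claim_equal_metric_reason_category_py := by
  intro reason _
  unfold Spec_metric_reason_category_py metric_reason_category_py metric_reason_category_py_alt
  by_cases h : PySem.Str.strip reason == ""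
  · simp [h]
  · simp only [h, Bool.false_eq_true, if_false]
    rw [pv_loop_eq _ _ pv_prefixes_colon_free, pv_walk_trie]
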